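-- pv_equiv track=rewrite | github.com/Pushpraj-Gour/testing | batch_decider2.py | split_answer_into_body_and_conclusion
-- ===== SOURCE A (Python) =====
-- def split_answer_into_body_and_conclusion(answer):
-- 	body, conclusion = '', None
-- 	for line in answer.splitlines(keepends=True):
-- 		if conclusion is None:
-- 			if 'Conclusion:' in line or 'Key Takeaways:' in line:
-- 				conclusion = line
-- 			else:
-- 				body += line
-- 		else:
-- 			conclusion += line
--
-- 	if conclusion is None:
-- 		body, conclusion = '', None
-- 		for line in answer.splitlines(keepends=True):
-- 			if conclusion is None:
-- 				if 'Conclusion' in line or 'Key Takeaways' in line: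
-- 					conclusion = line
-- 				else:
-- 					body += line
-- 			else:
-- 				conclusion += line
--
-- 	if conclusion is None:
-- 		body, conclusion = '', None
-- 		for line in answer.splitlines(keepends=True):
-- 			if conclusion is None:
-- 				if 'conclusion' in line or 'key takeaways' in line:
-- 					conclusion = line
-- 				else:
-- 					body += line
-- 			else:
-- 				conclusion += line
--
-- 	if ':' in conclusion:
-- 		conclusion = conclusion.split(':', 1)[1]
-- 	elif 'In conclusion, ' in conclusion:
-- 		conclusion = conclusion.split('In conclusion, ', 1)[1]
--
-- 	return body, conclusion
-- ===== SOURCE B (Python) =====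
-- def split_answer_into_body_and_conclusion(answer):
--     lines = answer.splitlines(keepends=True)
--     first = [None, None, None]
--     for k, line in enumerate(lines):
--         if first[0] is None and ('Conclusion:' in line or 'Key Takeaways:' in line):
--             first[0] = k
--         if first[1] is None and ('Conclusion' in line or 'Key Takeaways' in line):
--             first[1] = k
--         if first[2] is None and ('conclusion' in line or 'key takeaways' in line):
--             first[2] = k
--     i = next((k for k in first if k is not None), None)
--     body = ''.join(lines[:i]) if i is not None else ''
--     conclusion = ''.join(lines[i:]) if i is not None else None
--     if ':' in conclusion:
--         conclusion = conclusion.split(':', 1)[1]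
--     elif 'In conclusion, ' in conclusion:
--         conclusion = conclusion.split('In conclusion, ', 1)[1]
--     return body, conclusion
-- ===== Notes on version B (the rewrite author's own statement) =====
-- stated objective: alternative
-- what changed: A makes up to three full passes, each re-accumulating body/conclusion strings line by line with += ; B splits once, records in ONE enumerated pass the first matching line index for each of the three priority levels, picks the highest-priority hit, and builds body and conclusion by a single join of lines[:i] and lines[i:].
import Mathlib
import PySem

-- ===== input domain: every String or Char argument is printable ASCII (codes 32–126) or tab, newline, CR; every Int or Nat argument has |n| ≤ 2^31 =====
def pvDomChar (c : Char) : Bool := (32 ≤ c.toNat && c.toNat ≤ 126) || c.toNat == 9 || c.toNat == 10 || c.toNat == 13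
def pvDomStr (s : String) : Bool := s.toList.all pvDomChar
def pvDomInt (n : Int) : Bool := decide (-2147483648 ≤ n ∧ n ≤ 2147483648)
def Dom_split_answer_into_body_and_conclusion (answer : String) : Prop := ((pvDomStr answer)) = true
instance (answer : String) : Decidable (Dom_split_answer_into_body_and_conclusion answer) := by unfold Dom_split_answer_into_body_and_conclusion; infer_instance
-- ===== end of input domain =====

-- B replaces A's up-to-three accumulate-as-you-go passes by ONE enumerated pass that records the
-- first matching line index per priority level, then a single take/drop split (objective: alternative decomposition).

-- ===== PORT A =====
-- Python's str.splitlines(keepends=True), exact on the Dom alphabet (breaks: '\n', '\r', '\r\n');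
-- A calls this builtin, ported here as a right fold.
def pvSplitStep (c : Char) (lines : List (List Char)) : List (List Char) :=
  if c = '\n' then ['\n'] :: lines
  else if c = '\r' then
    match lines with
    | ('\n' :: l) :: rest => ('\r' :: '\n' :: l) :: rest
    | _ => ['\r'] :: lines
  else
    match lines with
    | [] => [[c]]
    | l :: rest => (c :: l) :: rest

def splitlinesK (cs : List Char) : List (List Char) := cs.foldr pvSplitStep []

-- A's three marker predicates, in priority order
def pvP1 (l : List Char) : Bool := PySem.Chars.isIn "Conclusion:".toList l || PySem.Chars.isIn "Key Takeaways:".toList l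
def pvP2 (l : List Char) : Bool := PySem.Chars.isIn "Conclusion".toList l || PySem.Chars.isIn "Key Takeaways".toList l
def pvP3 (l : List Char) : Bool := PySem.Chars.isIn "conclusion".toList l || PySem.Chars.isIn "key takeaways".toList l

-- the colon / 'In conclusion, ' stripping tail of A
def pvStrip (co : List Char) : List Char :=
  if PySem.Chars.isIn [':'] co then (PySem.Chars.splitOnMax co [':'] 1).getD 1 []
  else if PySem.Chars.isIn "In conclusion, ".toList co then (PySem.Chars.splitOnMax co "In conclusion, ".toList 1).getD 1 []
  else co

-- one of A's body/conclusion accumulation loops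
def pvStepA (p : List Char → Bool) (st : List Char × Option (List Char)) (line : List Char) : List Char × Option (List Char) :=
  match st.2 with
  | none => if p line then (st.1, some line) else (st.1 ++ line, none)
  | some c => (st.1, some (c ++ line))

def pvPassA (p : List Char → Bool) (lines : List (List Char)) : List Char × Option (List Char) :=
  lines.foldl (pvStepA p) ([], none)

def split_answer_into_body_and_conclusion (answer : String) : String × Option String :=
  let lines := splitlinesK answer.toList
  let r1 := pvPassA pvP1 lines
  let r2 := match r1.2 with | some _ => r1 | none => pvPassA pvP2 lines
  let r3 := match r2.2 with | some _ => r2 | none => pvPassA pvP3 lines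
  match r3.2 with
  | none => (String.ofList r3.1, none)  -- Python raises TypeError on ':' in None here; excluded by Pre_
  | some co => (String.ofList r3.1, some (String.ofList (pvStrip co)))

-- ===== PORT B =====
-- B's own port of the splitlines(keepends=True) builtin: direct recursion peeling one line at a time.
def bTakeLine : List Char → List Char × List Char
  | [] => ([], [])
  | '\n' :: r => (['\n'], r)
  | '\r' :: '\n' :: r => (['\r', '\n'], r)
  | '\r' :: r => (['\r'], r)
  | c :: r => let p := bTakeLine r; (c :: p.1, p.2)

lemma bTakeLine_snd_lt (c : Char) (r : List Char) :
    ((bTakeLine (c :: r)).2).length < (c :: r).length := by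
  induction r generalizing c with
  | nil =>
    rcases eq_or_ne c '\n' with rfl | h1
    · simp [bTakeLine]
    rcases eq_or_ne c '\r' with rfl | h2
    · simp [bTakeLine]
    · simp [bTakeLine]
  | cons d r ih =>
    rcases eq_or_ne c '\n' with rfl | h1
    · simp [bTakeLine]
    rcases eq_or_ne c '\r' with rfl | h2
    · rcases eq_or_ne d '\n' with rfl | hd
      · simp [bTakeLine]
      · simp [bTakeLine, hd]
    · have hE : bTakeLine (c :: d :: r) = (c :: (bTakeLine (d :: r)).1, (bTakeLine (d :: r)).2) := by
        simp [bTakeLine, h2]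
      have := ih d
      rw [hE]
      simp only [List.length_cons] at *
      omega

def bSplit : List Char → List (List Char)
  | [] => []
  | c :: r =>
      let p := bTakeLine (c :: r)
      p.1 :: bSplit p.2
termination_by cs => cs.length
decreasing_by exact bTakeLine_snd_lt c r

-- one enumerated pass: state = (next index, first hit per priority level)
def bStep (st : Nat × Option Nat × Option Nat × Option Nat) (line : List Char) :
    Nat × Option Nat × Option Nat × Option Nat :=
  (st.1 + 1,
   (if st.2.1.isNone && (PySem.Chars.isIn "Conclusion:".toList line || PySem.Chars.isIn "Key Takeaways:".toList line) then some st.1 else st.2.1),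
   (if st.2.2.1.isNone && (PySem.Chars.isIn "Conclusion".toList line || PySem.Chars.isIn "Key Takeaways".toList line) then some st.1 else st.2.2.1),
   (if st.2.2.2.isNone && (PySem.Chars.isIn "conclusion".toList line || PySem.Chars.isIn "key takeaways".toList line) then some st.1 else st.2.2.2))

-- Python's next((k for k in first if k is not None), None)
def bFirstSome : Option Nat → Option Nat → Option Nat → Option Nat
  | some k, _, _ => some k
  | none, some k, _ => some k
  | none, none, o => o

def split_answer_into_body_and_conclusion_alt (answer : String) : String × Option String :=
  let lines := bSplit answer.toList
  let st := lines.foldl bStep (0, none, none, none)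
  match bFirstSome st.2.1 st.2.2.1 st.2.2.2 with
  | none => ("", none)  -- Python B raises TypeError here, like A; excluded by Pre_
  | some i =>
      let body := PySem.Chars.join [] (lines.take i)
      let co := PySem.Chars.join [] (lines.drop i)
      let co2 :=
        if PySem.Chars.isIn [':'] co then (PySem.Chars.splitOnMax co [':'] 1).getD 1 []
        else if PySem.Chars.isIn "In conclusion, ".toList co then (PySem.Chars.splitOnMax co "In conclusion, ".toList 1).getD 1 []
        else co
      (String.ofList body, some (String.ofList co2))

-- ===== PRECONDITION & SPEC =====
-- Pre_ excludes exactly the inputs with no marker line at all, on which both Pythons raise TypeError (':' in None).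
def Pre_split_answer_into_body_and_conclusion (answer : String) : Prop :=
  (splitlinesK answer.toList).any (fun l => pvP2 l || pvP3 l) = true
instance (answer : String) : Decidable (Pre_split_answer_into_body_and_conclusion answer) := by unfold Pre_split_answer_into_body_and_conclusion; infer_instance

def pvWitness_split_answer_into_body_and_conclusion : String := "body line\nConclusion: done\nmore\n"

def Spec_split_answer_into_body_and_conclusion (answer : String) (out : String × Option String) : Prop := out = split_answer_into_body_and_conclusion_alt answer
instance (answer : String) (out : String × Option String) : Decidable (Spec_split_answer_into_body_and_conclusion answer out) := by unfold Spec_split_answer_into_body_and_conclusion; infer_instance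

-- ===== CLAIM (what is proved, stated in full; the proofs are below) =====
def Claim_equal_split_answer_into_body_and_conclusion : Prop := ∀ (answer : String), Dom_split_answer_into_body_and_conclusion answer → Pre_split_answer_into_body_and_conclusion answer → Spec_split_answer_into_body_and_conclusion answer (split_answer_into_body_and_conclusion answer)

-- ===== LEMMAS AND PROOFS =====

-- B's line splitter agrees with A's fold-based one
lemma bTakeLine_fst_cons (c : Char) (r : List Char) :
    ∃ l, (bTakeLine (c :: r)).1 = c :: l := by
  rcases eq_or_ne c '\n' with rfl | h1
  · exact ⟨[], by simp [bTakeLine]⟩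
  rcases eq_or_ne c '\r' with rfl | h2
  · cases r with
    | nil => exact ⟨[], by simp [bTakeLine]⟩
    | cons d r =>
      rcases eq_or_ne d '\n' with rfl | hd
      · exact ⟨['\n'], by simp [bTakeLine]⟩
      · exact ⟨[], by simp [bTakeLine, hd]⟩
  · exact ⟨(bTakeLine r).1, by simp [bTakeLine, h2]⟩

lemma bSplit_cons_step (c : Char) (r : List Char) :
    bSplit (c :: r) = pvSplitStep c (bSplit r) := by
  rcases eq_or_ne c '\n' with rfl | h1
  · simp [bSplit, bTakeLine, pvSplitStep]
  rcases eq_or_ne c '\r' with rfl | h2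
  · cases r with
    | nil => simp [bSplit, bTakeLine, pvSplitStep]
    | cons d r' =>
      rcases eq_or_ne d '\n' with rfl | hd
      · rw [show bSplit ('\r' :: '\n' :: r') = ['\r', '\n'] :: bSplit r' by simp [bSplit, bTakeLine]]
        rw [show bSplit ('\n' :: r') = ['\n'] :: bSplit r' by simp [bSplit, bTakeLine]]
        simp [pvSplitStep]
      · rw [show bSplit ('\r' :: d :: r') = ['\r'] :: bSplit (d :: r') by simp [bSplit, bTakeLine, hd]]
        obtain ⟨l, hl⟩ := bTakeLine_fst_cons d r'
        rw [show bSplit (d :: r') = (bTakeLine (d :: r')).1 :: bSplit (bTakeLine (d :: r')).2 by simp [bSplit]]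
        rw [hl]
        simp [pvSplitStep, hd]
  · cases r with
    | nil => simp [bSplit, bTakeLine, pvSplitStep, h1, h2]

    | cons d r' =>
      rw [show bSplit (c :: d :: r') = (c :: (bTakeLine (d :: r')).1) :: bSplit (bTakeLine (d :: r')).2 by
        simp [bSplit, bTakeLine, h2]]
      rw [show bSplit (d :: r') = (bTakeLine (d :: r')).1 :: bSplit (bTakeLine (d :: r')).2 by simp [bSplit]]
      simp [pvSplitStep, h1, h2]

lemma bSplit_eq_splitlinesK (cs : List Char) : bSplit cs = splitlinesK cs := by
  induction cs with
  | nil => rw [bSplit]; simp [splitlinesK]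
  | cons c r ih =>
    rw [bSplit_cons_step, ih]
    simp [splitlinesK]

-- characterisation of B's single pass: each component is the first matching index
def pvUpd (o : Option Nat) (p : List Char → Bool) (lines : List (List Char)) (n : Nat) : Option Nat :=
  match o with
  | some j => some j
  | none => (lines.findIdx? p).map (· + n)

lemma bScan_char (lines : List (List Char)) : ∀ (n : Nat) (o1 o2 o3 : Option Nat),
    lines.foldl bStep (n, o1, o2, o3) =
      (n + lines.length, pvUpd o1 pvP1 lines n, pvUpd o2 pvP2 lines n, pvUpd o3 pvP3 lines n) := by
  induction lines with
  | nil =>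
    intro n o1 o2 o3
    cases o1 <;> cases o2 <;> cases o3 <;> simp [pvUpd]
  | cons l ls ih =>
    intro n o1 o2 o3
    have hstep : bStep (n, o1, o2, o3) l =
        (n + 1,
         (if o1.isNone && pvP1 l then some n else o1),
         (if o2.isNone && pvP2 l then some n else o2),
         (if o3.isNone && pvP3 l then some n else o3)) := by
      simp [bStep, pvP1, pvP2, pvP3]
    have hupd : ∀ (o : Option Nat) (p : List Char → Bool),
        pvUpd (if o.isNone && p l then some n else o) p ls (n + 1) = pvUpd o p (l :: ls) n := by
      intro o p
      cases o with
      | some j => simp [pvUpd]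
      | none =>
        by_cases hp : p l = true
        · simp [pvUpd, hp, List.findIdx?_cons]
        · rw [Bool.not_eq_true] at hp
          simp only [pvUpd, Option.isNone_none, Bool.true_and, hp, Bool.false_eq_true, if_false,
            List.findIdx?_cons]
          cases h : ls.findIdx? p <;> simp [Option.map, Nat.add_assoc, Nat.add_comm 1 n]
    rw [List.foldl_cons, hstep, ih]
    rw [hupd o1 pvP1, hupd o2 pvP2, hupd o3 pvP3]
    simp [List.length_cons]
    omega

lemma pv_join_nil_eq_flatten (ls : List (List Char)) : PySem.Chars.join [] ls = ls.flatten := by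
  induction ls with
  | nil => simp [PySem.Chars.join, List.intercalate]
  | cons l ls ih =>
    cases ls with
    | nil => simp [PySem.Chars.join, List.intercalate]
    | cons l' ls' =>
      rw [PySem.Chars.join_cons_cons]
      simp_all

lemma pv_pass_some (p : List Char → Bool) (lines : List (List Char)) (b c : List Char) :
    lines.foldl (pvStepA p) (b, some c) = (b, some (c ++ lines.flatten)) := by
  induction lines generalizing c with
  | nil => simp
  | cons l ls ih => simp [pvStepA, ih]

lemma pv_pass_nomatch (p : List Char → Bool) (lines : List (List Char)) (b : List Char)
    (h : ∀ l ∈ lines, p l = false) :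
    lines.foldl (pvStepA p) (b, none) = (b ++ lines.flatten, none) := by
  induction lines generalizing b with
  | nil => simp
  | cons l ls ih =>
    have hl : p l = false := h l (by simp)
    simp only [List.foldl_cons, pvStepA, hl]
    simp only [Bool.false_eq_true, if_false]
    rw [ih (b ++ l) (fun x hx => h x (by simp [hx]))]
    simp

lemma pv_pass_found (p : List Char → Bool) (lines : List (List Char)) (b : List Char) (i : Nat)
    (h : lines.findIdx? p = some i) :
    lines.foldl (pvStepA p) (b, none) = (b ++ (lines.take i).flatten, some ((lines.drop i).flatten)) := by
  induction lines generalizing b i with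
  | nil => simp at h
  | cons l ls ih =>
    rw [List.findIdx?_cons] at h
    by_cases hl : p l = true
    · simp only [hl, if_true, Option.some.injEq] at h
      subst h
      simp only [List.foldl_cons, pvStepA, hl, if_true]
      rw [pv_pass_some]
      simp
    · cases hj : ls.findIdx? p with
      | none => rw [hj] at h; simp [hl] at h
      | some j =>
        rw [hj] at h
        have hi : i = j + 1 := by simp [hl] at h; omega
        subst hi
        have hlf : p l = false := by simpa using hl
        simp only [List.foldl_cons, pvStepA, hlf, Bool.false_eq_true, if_false]
        rw [ih (b ++ l) j hj]
        simp

-- B's fold result at offset 0, per level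
lemma pv_alt_eval (answer : String) :
    split_answer_into_body_and_conclusion_alt answer =
      (let lines := splitlinesK answer.toList
       match bFirstSome (lines.findIdx? pvP1) (lines.findIdx? pvP2) (lines.findIdx? pvP3) with
       | none => ("", none)
       | some i =>
           (String.ofList ((lines.take i).flatten),
            some (String.ofList (pvStrip ((lines.drop i).flatten))))) := by
  have hmap : ∀ (p : List Char → Bool) (lines : List (List Char)),
      pvUpd none p lines 0 = lines.findIdx? p := by
    intro p lines; cases h : lines.findIdx? p <;> simp [pvUpd, h]
  unfold split_answer_into_body_and_conclusion_alt
  simp only [bSplit_eq_splitlinesK, bScan_char, hmap]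
  set lines := splitlinesK answer.toList with hl
  cases h : bFirstSome (lines.findIdx? pvP1) (lines.findIdx? pvP2) (lines.findIdx? pvP3) with
  | none => simp
  | some i => simp [pvStrip, pv_join_nil_eq_flatten]

lemma pv_main (answer : String)
    (hpre : Pre_split_answer_into_body_and_conclusion answer) :
    split_answer_into_body_and_conclusion answer = split_answer_into_body_and_conclusion_alt answer := by
  rw [pv_alt_eval]
  unfold split_answer_into_body_and_conclusion
  set lines := splitlinesK answer.toList with hlines
  cases h1 : lines.findIdx? pvP1 with
  | some i =>
    simp only [pvPassA, pv_pass_found pvP1 lines [] i h1, List.nil_append, h1, bFirstSome]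
  | none =>
    have h1f : ∀ l ∈ lines, pvP1 l = false := List.findIdx?_eq_none_iff.mp h1
    cases h2 : lines.findIdx? pvP2 with
    | some i =>
      simp only [pvPassA, pv_pass_nomatch pvP1 lines [] h1f, pv_pass_found pvP2 lines [] i h2,
        List.nil_append, h1, h2, bFirstSome]
    | none =>
      have h2f : ∀ l ∈ lines, pvP2 l = false := List.findIdx?_eq_none_iff.mp h2
      cases h3 : lines.findIdx? pvP3 with
      | some i =>
        simp only [pvPassA, pv_pass_nomatch pvP1 lines [] h1f, pv_pass_nomatch pvP2 lines [] h2f,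
          pv_pass_found pvP3 lines [] i h3, List.nil_append, h1, h2, h3, bFirstSome]
      | none =>
        exfalso
        have h3f : ∀ l ∈ lines, pvP3 l = false := List.findIdx?_eq_none_iff.mp h3
        unfold Pre_split_answer_into_body_and_conclusion at hpre
        rw [List.any_eq_true] at hpre
        obtain ⟨l, hm, hp⟩ := hpre
        rw [← hlines] at hm
        rcases Bool.or_eq_true_iff.mp hp with h | h
        · exact absurd (h2f l hm) (by simp [h])
        · exact absurd (h3f l hm) (by simp [h])

-- ===== VERDICT (by name: the statement is the Claim_ definition above) =====
theorem split_answer_into_body_and_conclusion_spec : Claim_equal_split_answer_into_body_and_conclusion := by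
  intro answer _ hpre
  unfold Spec_split_answer_into_body_and_conclusion
  exact pv_main answer hpre
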